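-- pv_equiv track=rewrite | github.com/soyisuss/Traductor | translate.py | sort_words
-- ===== SOURCE A (Python) =====
-- def sort_words(words, rule):
--     # Crear una lista vacía para almacenar las palabras en el orden correcto
--     ordered_words = [None] * len(rule)
--
--     # Iterar sobre la tupla `rule` para encontrar el orden correspondiente en `words`
--     for idx, rule_category in enumerate(rule):
--         for word_tuple in words:
--             word, category = word_tuple  # Desempaquetar la palabra y su categoría
--             if category == rule_category:
--                 # Asignar la palabra en el índice correspondiente
--                 ordered_words[idx] = word_tuple
--                 break
--
--     # Filtrar cualquier valor None que no se haya llenado (si alguna palabra no coincide)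
--     ordered_words = [word for word in ordered_words if word is not None]
--
--     return ordered_words
-- ===== SOURCE B (Python) =====
-- def sort_words(words, rule):
--     # Scatter approach: invert A's loop nesting. One pass over rule builds
--     # category -> list of slot indices; one pass over words fills the slots
--     # of the first word seen per category; then keep the filled slots.
--     positions = {}
--     for i, c in enumerate(rule):
--         positions.setdefault(c, []).append(i)
--     slots = [None] * len(rule)
--     done = set()
--     for wt in words:
--         cat = wt[1]
--         if cat in positions and cat not in done:
--             done.add(cat)
--             for i in positions[cat]:
--                 slots[i] = wt
--     return [wt for wt in slots if wt is not None]
-- ===== Notes on version B (the rewrite author's own statement) =====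
-- stated objective: faster
-- what changed: Inverts the loop nesting: instead of scanning all words for each rule entry, B builds a category-to-slot-indices map from rule, then makes one scatter pass over words, the first word of each category filling all its slots at once.
import Mathlib
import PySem

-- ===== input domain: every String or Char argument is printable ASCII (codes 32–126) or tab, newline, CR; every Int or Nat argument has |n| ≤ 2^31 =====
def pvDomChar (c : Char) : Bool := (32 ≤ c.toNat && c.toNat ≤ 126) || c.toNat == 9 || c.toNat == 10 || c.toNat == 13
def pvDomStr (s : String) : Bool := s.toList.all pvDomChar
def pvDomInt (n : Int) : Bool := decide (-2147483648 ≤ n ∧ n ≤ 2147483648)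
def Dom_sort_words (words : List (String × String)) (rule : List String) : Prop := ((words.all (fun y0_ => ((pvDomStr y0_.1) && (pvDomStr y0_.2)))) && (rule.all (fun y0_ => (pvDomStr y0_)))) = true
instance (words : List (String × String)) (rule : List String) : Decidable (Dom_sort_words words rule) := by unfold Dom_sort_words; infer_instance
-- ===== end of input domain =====

-- B inverts A's loop nesting (scatter instead of per-rule scans), objective: faster.

-- ===== PORT A =====
-- inner 'for word_tuple in words: … if category == rule_category: assign; break' (none = slot stays None)
def swInner (words : List (String × String)) (c : String) : Option (String × String) :=
  match words with
  | [] => none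
  | wt :: rest => if wt.2 == c then some wt else swInner rest c

def sort_words (words : List (String × String)) (rule : List String) : List (String × String) :=
  -- ordered_words[idx] filled per rule category, then Nones filtered out
  let ordered := rule.map (fun c => swInner words c)
  ordered.filterMap id

-- ===== PORT B =====
-- positions = {}; for i, c in enumerate(rule): positions.setdefault(c, []).append(i)
def swPositions (rule : List String) : PySem.Dict String (List Int) :=
  (PySem.List.enumerate rule 0).foldl (fun d p => d.modify p.2 [] (· ++ [p.1])) PySem.Dict.empty

def sort_words_alt (words : List (String × String)) (rule : List String) : List (String × String) :=
  let positions := swPositions rule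
  let init : List (Option (String × String)) := List.replicate rule.length none
  let st := words.foldl
    (fun (st : List (Option (String × String)) × PySem.Set String) wt =>
      if positions.contains wt.2 && !(PySem.Set.contains st.2 wt.2) then
        ((positions.getD wt.2 []).foldl (fun sl i => PySem.List.pySetD sl i (some wt)) st.1,
         PySem.Set.add st.2 wt.2)
      else st)
    (init, PySem.Set.empty)
  st.1.filterMap id

-- ===== PRECONDITION & SPEC =====
def Spec_sort_words (words : List (String × String)) (rule : List String) (out : List (String × String)) : Prop := out = sort_words_alt words rule
instance (words : List (String × String)) (rule : List String) (out : List (String × String)) : Decidable (Spec_sort_words words rule out) := by unfold Spec_sort_words; infer_instance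

-- ===== CLAIM (what is proved, stated in full; the proofs are below) =====
def Claim_equal_sort_words : Prop := ∀ (words : List (String × String)) (rule : List String), Dom_sort_words words rule → Spec_sort_words words rule (sort_words words rule)

-- ===== LEMMAS AND PROOFS =====

-- slot indices of category c in rule
def swIdxs (rule : List String) (c : String) : List Int :=
  ((PySem.List.enumerate rule 0).filter (fun p => p.2 == c)).map (·.1)

theorem swPositions_getD_gen (l : List (Int × String)) (d : PySem.Dict String (List Int)) (c : String) :
    (l.foldl (fun d p => d.modify p.2 [] (· ++ [p.1])) d).getD c []
      = d.getD c [] ++ (l.filter (fun p => p.2 == c)).map (·.1) := by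
  induction l generalizing d with
  | nil => simp
  | cons p rest ih =>
    simp only [List.foldl_cons, ih, List.filter_cons]
    by_cases h : p.2 = c
    · simp [h, PySem.Dict.getD_modify_self]
    · rw [PySem.Dict.getD_modify, if_neg (fun hc : c = p.2 => h hc.symm)]
      simp [beq_eq_false_iff_ne.mpr h]

theorem swPositions_getD (rule : List String) (c : String) :
    (swPositions rule).getD c [] = swIdxs rule c := by
  simp [swPositions, swIdxs, swPositions_getD_gen]

theorem swPositions_contains (rule : List String) (c : String) :
    (swPositions rule).contains c = decide (c ∈ rule) := by
  rw [PySem.Dict.contains_eq_decide_mem_keys]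
  unfold swPositions
  rw [PySem.Dict.keys_foldl_modify_key (key := fun p : Int × String => p.2)]
  simp [PySem.Set.update_nil_left, PySem.Set.mem_ofList, PySem.List.map_snd_enumerate,
    PySem.Dict.keys_empty]

theorem mem_swIdxs (rule : List String) (c : String) (i : Int) :
    i ∈ swIdxs rule c ↔ ∃ (k : Nat) (h : k < rule.length), i = (k : Int) ∧ rule[k] = c := by
  simp only [swIdxs, List.mem_map, List.mem_filter, PySem.List.mem_enumerate_iff]
  constructor
  · rintro ⟨p, ⟨⟨k, hk, rfl⟩, hc⟩, rfl⟩
    exact ⟨k, hk, by simpa using hc⟩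
  · rintro ⟨k, hk, rfl, hc⟩
    exact ⟨((k : Int), rule[k]), ⟨⟨k, hk, by simp⟩, by simpa using hc⟩, rfl⟩

theorem foldl_pySetD_getElem? (v : Option (String × String)) (l : List Int)
    (hl : ∀ i ∈ l, 0 ≤ i) (sl : List (Option (String × String))) (j : Nat) :
    (l.foldl (fun sl i => PySem.List.pySetD sl i v) sl)[j]?
      = if (j : Int) ∈ l ∧ j < sl.length then some v else sl[j]? := by
  induction l generalizing sl with
  | nil => simp
  | cons i rest ih =>
    have hi : (0 : Int) ≤ i := hl i (by simp)
    simp only [List.foldl_cons]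
    rw [PySem.List.pySetD_of_nonneg _ _ hi,
      ih (fun x hx => hl x (by simp [hx]))]
    simp only [List.length_set, List.getElem?_set, List.mem_cons]
    by_cases hr : (j : Int) ∈ rest
    · by_cases hj : j < sl.length
      · simp [hr, hj]
      · simp [hr, hj]
        omega
    · have hji : ((j : Int) = i) ↔ (i.toNat = j) := by omega
      by_cases hj : j < sl.length
      · by_cases he : i.toNat = j
        · simp [hr, hj, he, hji]
        · simp only [hr, hj, and_true, or_false, if_false]
          simp only [he, if_false]
          rw [if_neg (fun h : (j : Int) = i => he (hji.mp h))]
      · simp [hr, hj]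
        omega

theorem swScatter (rule : List String) (c : String) (wt : String × String)
    (g : String → Option (String × String)) :
    (swIdxs rule c).foldl (fun sl i => PySem.List.pySetD sl i (some wt)) (rule.map g)
      = rule.map (fun x => if x = c then some wt else g x) := by
  apply List.ext_getElem?
  intro j
  rw [foldl_pySetD_getElem? _ _ (fun i hi => by
    obtain ⟨k, _, rfl, _⟩ := (mem_swIdxs rule c i).mp hi
    exact Int.natCast_nonneg k)]
  have hmem : ((j : Int) ∈ swIdxs rule c) ↔ (∃ h : j < rule.length, rule[j] = c) := by
    rw [mem_swIdxs]
    constructor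
    · rintro ⟨k, hk, hkj, hkc⟩
      have : k = j := by omega
      subst this; exact ⟨hk, hkc⟩
    · rintro ⟨hj, hc⟩; exact ⟨j, hj, rfl, hc⟩
  by_cases hj : j < rule.length
  · by_cases hc : rule[j] = c
    · simp [hmem, hj, hc]
    · have : ¬ ((j : Int) ∈ swIdxs rule c) := fun h => hc (hmem.mp h).2
      simp [this, List.getElem?_map, List.getElem?_eq_getElem hj, hc]
  · have : ¬ ((j : Int) ∈ swIdxs rule c) := fun h => hj (hmem.mp h).1
    simp [this, hj]

theorem swContains (s : PySem.Set String) (x : String) :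
    PySem.Set.contains s x = decide (x ∈ s) := by
  by_cases hm : x ∈ s
  · simp [hm]
  · cases h : PySem.Set.contains s x
    · simp [hm]
    · exact absurd ((PySem.Set.contains_iff s x).mp h) hm

theorem sw_main (rule : List String) (ws : List (String × String))
    (g : String → Option (String × String)) (slots : List (Option (String × String)))
    (done : PySem.Set String)
    (hs : slots = rule.map g)
    (hd : ∀ c ∈ rule, PySem.Set.contains done c = (g c).isSome) :
    (ws.foldl
      (fun (st : List (Option (String × String)) × PySem.Set String) wt =>
        if (swPositions rule).contains wt.2 && !(PySem.Set.contains st.2 wt.2) then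
          (((swPositions rule).getD wt.2 []).foldl
              (fun sl i => PySem.List.pySetD sl i (some wt)) st.1,
           PySem.Set.add st.2 wt.2)
        else st)
      (slots, done)).1 = rule.map (fun c => (g c).or (swInner ws c)) := by
  induction ws generalizing g slots done with
  | nil => rw [List.foldl_nil, hs]; simp [swInner]
  | cons wt rest ih =>
    simp only [List.foldl_cons]
    by_cases hmem : wt.2 ∈ rule
    · have hdone : PySem.Set.contains done wt.2 = (g wt.2).isSome := hd _ hmem
      cases hG : g wt.2 with
      | none =>
        have hdone' : PySem.Set.contains done wt.2 = false := by rw [hdone, hG]; rfl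
        have hcond : ((swPositions rule).contains wt.2 && !(PySem.Set.contains done wt.2)) = true := by
          rw [swPositions_contains, hdone']; simp [hmem]
        rw [if_pos hcond, swPositions_getD rule wt.2, hs, swScatter,
          ih (fun x => if x = wt.2 then some wt else g x) _ _ rfl ?_]
        · apply List.map_congr_left
          intro c _
          by_cases hcw : c = wt.2
          · subst hcw; simp [swInner, hG]
          · simp [swInner, hcw, beq_eq_false_iff_ne.mpr (fun h : wt.2 = c => hcw h.symm)]
        · intro c hc
          have h2 := hd c hc
          rw [swContains] at h2
          by_cases hcw : c = wt.2
          · subst hcw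
            simp [PySem.Set.mem_add]
          · simp [PySem.Set.mem_add, hcw, h2]
      | some w =>
        have hcond : ¬ (((swPositions rule).contains wt.2 && !(PySem.Set.contains done wt.2)) = true) := by
          rw [hdone, hG]; simp
        rw [if_neg hcond, ih g _ _ hs hd]
        apply List.map_congr_left
        intro c _
        by_cases hcw : c = wt.2
        · subst hcw; rw [hG]; simp
        · simp [swInner, beq_eq_false_iff_ne.mpr (fun h : wt.2 = c => hcw h.symm)]
    · have hcond : ¬ (((swPositions rule).contains wt.2 && !(PySem.Set.contains done wt.2)) = true) := by
        rw [swPositions_contains]; simp [hmem]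
      rw [if_neg hcond, ih g _ _ hs hd]
      apply List.map_congr_left
      intro c hc
      have hcw : ¬ c = wt.2 := fun h => hmem (h ▸ hc)
      simp [swInner, beq_eq_false_iff_ne.mpr (fun h : wt.2 = c => hcw h.symm)]

-- ===== VERDICT (by name: the statement is the Claim_ definition above) =====
theorem sort_words_spec : Claim_equal_sort_words := by
  intro words rule _
  show (rule.map (fun c => swInner words c)).filterMap id
      = ((words.foldl
          (fun (st : List (Option (String × String)) × PySem.Set String) wt =>
            if (swPositions rule).contains wt.2 && !(PySem.Set.contains st.2 wt.2) then
              (((swPositions rule).getD wt.2 []).foldl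
                  (fun sl i => PySem.List.pySetD sl i (some wt)) st.1,
               PySem.Set.add st.2 wt.2)
            else st)
          (List.replicate rule.length none, PySem.Set.empty)).1).filterMap id
  rw [sw_main rule words (fun _ => none) _ _ (by simp [List.map_const']) (by intro c _; rfl)]
  simp
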